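-- pv_equiv track=rewrite | github.com/Kauan-Cunha/IC | algorithms/terceiro_semestre/algoAcogue.py | converter_adj_direta_para_reversa
-- ===== SOURCE A (Python) =====
-- def converter_adj_direta_para_reversa(adj_direta: list) -> list:
--     """
--     Converte uma lista de adjacência direta para uma lista de adjacência reversa.
--
--     Args:
--         adj_direta (list): O grafo em formato de lista de adjacência direta.
--
--     Returns:
--         list: O mesmo grafo em formato de lista de adjacência reversa.
--     """
--     # A lógica é a mesma da função anterior, apenas invertida.
--     num_nos = len(adj_direta)
--     for arestas in adj_direta:
--         for filho, _ in arestas: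
--             if filho + 1 > num_nos:
--                 num_nos = filho + 1
--
--     adj_reversa = [[] for _ in range(num_nos)]
--
--     # 'pai' é o índice do nó de origem.
--     for pai, arestas_de_saida in enumerate(adj_direta):
--         # 'filho' é o nó de destino.
--         for filho, peso in arestas_de_saida:
--             # Se a aresta é de 'pai' para 'filho', na lista reversa,
--             # adicionamos a tupla (pai, peso) na lista do 'filho'.
--             adj_reversa[filho].append((pai, peso))
--
--     return adj_reversa
-- ===== SOURCE B (Python) =====
-- def converter_adj_direta_para_reversa(adj_direta: list) -> list:
--     """
--     Conversao dirigida pela SAIDA: achata todas as arestas uma vez e, para cada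
--     no destino, constroi sua lista reversa filtrando a lista achatada de arestas
--     (nenhum append em tabela mutavel).
--     """
--     arestas = [(filho, pai, peso)
--                for pai, saida in enumerate(adj_direta)
--                for filho, peso in saida]
--     num_nos = max([len(adj_direta)] + [filho + 1 for filho, _, _ in arestas])
--     return [[(pai, peso) for filho, pai, peso in arestas if filho == no]
--             for no in range(num_nos)]
-- ===== Notes on version B (the rewrite author's own statement) =====
-- stated objective: alternative
-- what changed: B is output-directed: it flattens all edges into one list of (child, parent, weight) triples and builds each target node's reverse list by filtering that flat list per node, instead of A's edge-driven pass that appends each edge into a pre-allocated mutable table.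
-- outside the precondition, e.g. on converter_adj_direta_para_reversa([[(-1, 1)], [(2, 3)]]): A returns [[], [], [(0, 1), (1, 3)]], B returns [[], [], [(1, 3)]]
import Mathlib
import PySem

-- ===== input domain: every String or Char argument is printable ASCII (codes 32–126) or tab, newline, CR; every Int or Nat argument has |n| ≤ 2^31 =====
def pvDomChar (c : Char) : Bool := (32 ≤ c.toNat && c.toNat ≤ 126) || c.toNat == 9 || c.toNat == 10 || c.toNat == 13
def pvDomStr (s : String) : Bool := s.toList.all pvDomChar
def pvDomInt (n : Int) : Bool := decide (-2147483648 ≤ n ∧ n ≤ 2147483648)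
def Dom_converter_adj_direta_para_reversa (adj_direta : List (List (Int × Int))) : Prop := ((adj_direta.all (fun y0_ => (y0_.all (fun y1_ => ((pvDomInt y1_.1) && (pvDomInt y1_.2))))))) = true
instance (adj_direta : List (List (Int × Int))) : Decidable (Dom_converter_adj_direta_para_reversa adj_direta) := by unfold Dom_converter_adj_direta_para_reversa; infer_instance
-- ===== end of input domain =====

-- B reverses the graph output-directed: one flat edge list, then each target node's list is a filter
-- of it — no appends into a mutable table; objective: alternative algorithm, not claimed faster.

-- ===== PORT A =====
-- Python's 'adj_reversa[filho].append(v)' on a list of lists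
-- (pyIdx? resolves Python's possibly-negative index; none = IndexError, unreachable inside Pre_)
def pvAppendAt (xs : List (List (Int × Int))) (i : Int) (v : Int × Int) : List (List (Int × Int)) :=
  match PySem.List.pyIdx? xs.length i with
  | some j => xs.set j ((xs[j]?.getD []) ++ [v])
  | none => xs

def converter_adj_direta_para_reversa (adj_direta : List (List (Int × Int))) : List (List (Int × Int)) :=
  let num_nos : Int :=
    adj_direta.foldl
      (fun n arestas => arestas.foldl (fun n fp => if fp.1 + 1 > n then fp.1 + 1 else n) n)
      (adj_direta.length : Int)
  let adj_reversa : List (List (Int × Int)) := List.replicate num_nos.toNat []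
  (PySem.List.enumerate adj_direta).foldl
    (fun rev pe => pe.2.foldl (fun rev fp => pvAppendAt rev fp.1 (pe.1, fp.2)) rev)
    adj_reversa

-- ===== PORT B =====
def converter_adj_direta_para_reversa_alt (adj_direta : List (List (Int × Int))) : List (List (Int × Int)) :=
  let arestas : List (Int × Int × Int) :=
    (PySem.List.enumerate adj_direta).flatMap (fun pe => pe.2.map (fun fp => (fp.1, pe.1, fp.2)))
  -- max([len(adj_direta)] + [...]): Python's max of a nonempty int list, ported as the left fold
  -- of binary max over the tail with the head as the initial value — exact for Int
  let num_nos : Int := (arestas.map (fun t => t.1 + 1)).foldl max (adj_direta.length : Int)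
  (PySem.List.pyRange 0 num_nos 1).map
    (fun no => (arestas.filter (fun t => t.1 == no)).map (fun t => (t.2.1, t.2.2)))

-- ===== PRECONDITION & SPEC =====
-- Pre_ excludes inputs containing a negative child index, on which A either raises IndexError or
-- wraps Python's negative indexing to a slot determined by its pre-computed table size — an
-- accidental placement no adjacency-list reading would specify (B's per-node filter drops such edges).
def Pre_converter_adj_direta_para_reversa (adj_direta : List (List (Int × Int))) : Prop :=
  ∀ arestas ∈ adj_direta, ∀ fp ∈ arestas, 0 ≤ fp.1
instance (adj_direta : List (List (Int × Int))) : Decidable (Pre_converter_adj_direta_para_reversa adj_direta) := by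
  unfold Pre_converter_adj_direta_para_reversa; infer_instance

def pvWitness_converter_adj_direta_para_reversa : (List (List (Int × Int))) :=
  [[(1, 10), (2, 20)], [(2, 30)], []]

def Spec_converter_adj_direta_para_reversa (adj_direta : List (List (Int × Int))) (out : List (List (Int × Int))) : Prop := out = converter_adj_direta_para_reversa_alt adj_direta
instance (adj_direta : List (List (Int × Int))) (out : List (List (Int × Int))) : Decidable (Spec_converter_adj_direta_para_reversa adj_direta out) := by unfold Spec_converter_adj_direta_para_reversa; infer_instance

-- ===== CLAIM =====
def Claim_equal_converter_adj_direta_para_reversa : Prop := ∀ (adj_direta : List (List (Int × Int))), Dom_converter_adj_direta_para_reversa adj_direta → Pre_converter_adj_direta_para_reversa adj_direta → Spec_converter_adj_direta_para_reversa adj_direta (converter_adj_direta_para_reversa adj_direta)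

-- ===== LEMMAS AND PROOFS =====

-- flat edge list in A's traversal order: (pai, filho, peso)
def pvFlat (adj : List (List (Int × Int))) : List (Int × Int × Int) :=
  (PySem.List.enumerate adj).flatMap (fun pe => pe.2.map (fun fp => (pe.1, fp.1, fp.2)))

def pvStepA (rev : List (List (Int × Int))) (t : Int × Int × Int) : List (List (Int × Int)) :=
  pvAppendAt rev t.2.1 (t.1, t.2.2)

def pvMaxStep (n : Int) (t : Int × Int × Int) : Int :=
  if t.2.1 + 1 > n then t.2.1 + 1 else n

-- B's per-node gather of the flat edge list
def pvGather (ts : List (Int × Int × Int)) (no : Int) : List (Int × Int) :=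
  (ts.filter (fun t => t.2.1 == no)).map (fun t => (t.1, t.2.2))

theorem pv_nested_eq_flat {S : Type} (g : S → Int × Int × Int → S) :
    ∀ (l : List (Int × List (Int × Int))) (init : S),
      l.foldl (fun s pe => pe.2.foldl (fun s fp => g s (pe.1, fp.1, fp.2)) s) init
        = (l.flatMap (fun pe => pe.2.map (fun fp => (pe.1, fp.1, fp.2)))).foldl g init := by
  intro l
  induction l with
  | nil => intro init; rfl
  | cons pe l ih =>
      intro init
      simp [List.flatMap_cons, List.foldl_append, List.foldl_map, ih]

theorem pv_A_flat (adj : List (List (Int × Int))) (init : List (List (Int × Int))) :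
    (PySem.List.enumerate adj).foldl
        (fun rev pe => pe.2.foldl (fun rev fp => pvAppendAt rev fp.1 (pe.1, fp.2)) rev) init
      = (pvFlat adj).foldl pvStepA init := by
  rw [pvFlat, ← pv_nested_eq_flat pvStepA]
  rfl

theorem pv_num_flat (adj : List (List (Int × Int))) (init : Int) :
    adj.foldl
        (fun n arestas => arestas.foldl (fun n fp => if fp.1 + 1 > n then fp.1 + 1 else n) n) init
      = (pvFlat adj).foldl pvMaxStep init := by
  conv_lhs => rw [← PySem.List.map_snd_enumerate adj 0, List.foldl_map]
  rw [pvFlat, ← pv_nested_eq_flat pvMaxStep]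
  rfl

-- B's edge list is the flat list with components swapped
theorem pv_B_edges (adj : List (List (Int × Int))) :
    (PySem.List.enumerate adj).flatMap (fun pe => pe.2.map (fun fp => (fp.1, pe.1, fp.2)))
      = (pvFlat adj).map (fun t => (t.2.1, t.1, t.2.2)) := by
  rw [pvFlat, List.map_flatMap]
  simp [List.map_map, Function.comp_def]

theorem pv_mono : ∀ (ts : List (Int × Int × Int)) (n : Int), n ≤ ts.foldl pvMaxStep n := by
  intro ts
  induction ts with
  | nil => intro n; simp
  | cons t ts ih =>
      intro n
      refine le_trans ?_ (ih (pvMaxStep n t))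
      simp only [pvMaxStep]; split <;> omega

theorem pv_bound : ∀ (ts : List (Int × Int × Int)) (n : Int) (t : Int × Int × Int),
    t ∈ ts → t.2.1 + 1 ≤ ts.foldl pvMaxStep n := by
  intro ts
  induction ts with
  | nil => intro n t h; simp at h
  | cons u ts ih =>
      intro n t h
      rcases List.mem_cons.mp h with h | h
      · refine le_trans ?_ (pv_mono ts (pvMaxStep n u))
        simp only [pvMaxStep, h]
        split <;> omega
      · exact ih _ _ h

theorem pv_pyIdx_in_range (n : Nat) (i : Int) (h0 : 0 ≤ i) (h1 : i < (n : Int)) :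
    PySem.List.pyIdx? n i = some i.toNat := by
  unfold PySem.List.pyIdx?
  rw [if_pos h0, if_pos h1]

-- MAIN INVARIANT: A's append-fold over a flat edge list, started from the empty table of size N,
-- is exactly the per-node gather table.
theorem pv_main (N : Int) :
    ∀ (ts : List (Int × Int × Int)), (∀ t ∈ ts, 0 ≤ t.2.1 ∧ t.2.1 < N) →
      ts.foldl pvStepA (List.replicate N.toNat [])
        = (PySem.List.pyRange 0 N 1).map (pvGather ts) := by
  intro ts
  induction ts using List.reverseRecOn with
  | nil =>
      intro _
      have hg : pvGather [] = fun _ : Int => ([] : List (Int × Int)) := by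
        funext no; simp [pvGather]
      rw [List.foldl_nil, hg, List.map_const', PySem.List.length_pyRange_one]
      congr 1
      omega
  | append_singleton ts t ih =>
      intro h
      have ht := h t (by simp)
      rw [List.foldl_append, List.foldl_cons, List.foldl_nil,
        ih (fun u hu => h u (List.mem_append_left _ hu))]
      -- one append step on the gathered table
      have hlen : ((PySem.List.pyRange 0 N 1).map (pvGather ts)).length = N.toNat := by
        rw [List.length_map, PySem.List.length_pyRange_one]; simp
      have hidx : PySem.List.pyIdx? ((PySem.List.pyRange 0 N 1).map (pvGather ts)).length t.2.1
          = some t.2.1.toNat := by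
        rw [hlen]
        exact pv_pyIdx_in_range _ _ ht.1 (by omega)
      simp only [pvStepA, pvAppendAt, hidx]
      apply List.ext_getElem
      · rw [List.length_set, hlen, List.length_map, PySem.List.length_pyRange_one]; simp
      · intro k hk1 hk2
        rw [List.length_set, hlen] at hk1
        have hkN : (k : Int) < N := by omega
        have hget : ∀ (us : List (Int × Int × Int)),
            ((PySem.List.pyRange 0 N 1).map (pvGather us))[k]'(by
              rw [List.length_map, PySem.List.length_pyRange_one]; omega) = pvGather us (k : Int) := by
          intro us
          rw [List.getElem_map]
          congr 1
          rw [PySem.List.getElem_pyRange_one]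
          omega
        rw [hget (ts ++ [t])]
        by_cases hkj : k = t.2.1.toNat
        · subst hkj
          rw [List.getElem_set_self (by rw [List.length_set, hlen]; omega)]
          have hq : ((PySem.List.pyRange 0 N 1).map (pvGather ts))[t.2.1.toNat]?
              = some (pvGather ts (t.2.1.toNat : Int)) := by
            rw [List.getElem?_eq_getElem (by rw [hlen]; omega), hget ts]
          rw [hq]
          simp only [Option.getD_some, pvGather, List.filter_append, List.map_append]
          congr 2
          simp [ht.1]
        · rw [List.getElem_set_ne (by omega), hget ts]
          simp only [pvGather, List.filter_append]
          have hne : (t.2.1 == ((k : Nat) : Int)) = false := by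
            simp; omega
          simp [hne]

-- ===== VERDICT =====
theorem converter_adj_direta_para_reversa_spec : Claim_equal_converter_adj_direta_para_reversa := by
  intro adj _ hpre
  unfold Spec_converter_adj_direta_para_reversa
  simp only [converter_adj_direta_para_reversa, converter_adj_direta_para_reversa_alt]
  rw [pv_A_flat, pv_num_flat, pv_B_edges]
  have hmax : ((pvFlat adj).map (fun t => (t.2.1, t.1, t.2.2))).map
        (fun t : Int × Int × Int => t.1 + 1)
      = (pvFlat adj).map (fun t => t.2.1 + 1) := by
    simp [List.map_map, Function.comp_def]
  rw [hmax]
  have hfun : pvMaxStep = fun (n : Int) (t : Int × Int × Int) => max n (t.2.1 + 1) := by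
    funext n t; simp only [pvMaxStep]; omega
  have hN : ((pvFlat adj).map (fun t => t.2.1 + 1)).foldl max (adj.length : Int)
      = (pvFlat adj).foldl pvMaxStep (adj.length : Int) := by
    rw [List.foldl_map, hfun]
  set N : Int := (pvFlat adj).foldl pvMaxStep (adj.length : Int) with hNdef
  rw [hN]
  have hmem : ∀ t ∈ pvFlat adj, 0 ≤ t.2.1 ∧ t.2.1 < N := by
    intro t htm
    constructor
    · rw [pvFlat] at htm
      rcases List.mem_flatMap.mp htm with ⟨pe, hpe, ht⟩
      rcases List.mem_map.mp ht with ⟨fp, hfp, hteq⟩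
      have hsnd : pe.2 ∈ adj := by
        rw [← PySem.List.map_snd_enumerate adj 0]
        exact List.mem_map.mpr ⟨pe, hpe, rfl⟩
      have := hpre pe.2 hsnd fp hfp
      subst hteq
      simpa using this
    · have := pv_bound (pvFlat adj) (adj.length : Int) t htm
      omega
  rw [pv_main N (pvFlat adj) hmem]
  congr 1
  funext no
  simp only [pvGather, List.filter_map, List.map_map, Function.comp_def]
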